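-- pv_equiv track=rewrite | github.com/JTexpo/Sudoku_DFS | sudoku_dfs/merge_move.py | advance_width_moves
-- ===== SOURCE A (Python) =====
-- from typing import List, Tuple, Set
--
-- def advance_width_moves(
--     possible_moves: List[List[List[int]]], x_position: int, y_position: int
-- ) -> Set[int]:
--     """A function to find all the valid moves that exists in a row
--
--     Args:
--         board (List[List[int]]): the sudoku board
--         y_position (int): which row to find all avaible numbers
--
--     Returns:
--         List[int]: a list of avaible numbers
--     """
--     all_moves = set(possible_moves[y_position][x_position])
--
--     for column_index, column in enumerate(possible_moves[y_position]):
--         if column_index == x_position: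
--             continue
--         other_moves = set(column)
--         all_moves = all_moves - other_moves
--         if not all_moves:
--             return set([])
--
--     return all_moves
-- ===== SOURCE B (Python) =====
-- def advance_width_moves(possible_moves, x_position, y_position):
--     row = possible_moves[y_position]
--     target = row[x_position]
--     counts = {}
--     for column in row:
--         for value in set(column):
--             counts[value] = counts.get(value, 0) + 1
--     return {value for value in target if counts.get(value, 0) == 1}
-- ===== Notes on version B (the rewrite author's own statement) =====
-- stated objective: alternative
-- what changed: B replaces A's iterated set subtraction by a counting algorithm: one pass builds a dict mapping each candidate to the number of cells of the row containing it, then B returns the target cell's candidates whose count is exactly 1.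
-- intended difference: For negative in-range x_position whose target cell holds a candidate appearing in no other cell of the row, A returns the empty set (enumerate indices are never equal to the negative x_position, so A subtracts the target cell from itself) while B returns those unique candidates, the intended result since a negative index denotes the same cell. — e.g. on advance_width_moves([[[1], [2]]], -2, 0): A returns [], B returns [1]
import Mathlib
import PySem

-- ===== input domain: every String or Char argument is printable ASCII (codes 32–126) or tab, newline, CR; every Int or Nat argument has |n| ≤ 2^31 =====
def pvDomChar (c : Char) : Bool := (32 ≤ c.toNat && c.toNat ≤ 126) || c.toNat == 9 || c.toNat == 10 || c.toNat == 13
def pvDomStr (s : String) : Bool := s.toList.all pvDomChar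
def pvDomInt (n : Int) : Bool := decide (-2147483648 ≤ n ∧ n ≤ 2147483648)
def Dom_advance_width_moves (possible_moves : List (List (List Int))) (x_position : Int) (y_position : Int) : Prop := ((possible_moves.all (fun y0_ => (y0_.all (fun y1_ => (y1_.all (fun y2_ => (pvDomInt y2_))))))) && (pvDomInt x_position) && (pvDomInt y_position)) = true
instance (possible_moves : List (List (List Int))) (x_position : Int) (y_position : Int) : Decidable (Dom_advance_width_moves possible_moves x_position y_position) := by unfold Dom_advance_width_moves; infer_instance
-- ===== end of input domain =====

-- B replaces A's iterated set subtraction by a counting pass (candidate -> number of cells of the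
-- row containing it) followed by selecting the target cell's candidates counted exactly once.

-- ===== PORT A =====
-- the 'for column_index, column in enumerate(...)' loop with its early 'return set([])'
def awmLoopA (x : Int) : List (Int × List Int) → PySem.Set Int → PySem.Set Int
  | [], all_moves => all_moves
  | (column_index, column) :: rest, all_moves =>
    if column_index = x then awmLoopA x rest all_moves
    else
      let other_moves := PySem.Set.ofList column
      let all_moves' := PySem.Set.diff all_moves other_moves
      if all_moves' = [] then [] else awmLoopA x rest all_moves'

def advance_width_moves (possible_moves : List (List (List Int))) (x_position : Int) (y_position : Int) : List Int :=
  let row := (PySem.List.pyGet? possible_moves y_position).getD []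
  let all_moves := PySem.Set.ofList ((PySem.List.pyGet? row x_position).getD [])
  awmLoopA x_position (PySem.List.enumerate row) all_moves

-- ===== PORT B =====
-- 'for column in row: for value in set(column): counts[value] = counts.get(value, 0) + 1'
def awmCounts (row : List (List Int)) : PySem.Dict Int Int :=
  row.foldl (fun d col => (PySem.Set.ofList col).foldl (fun d v => d.insert v (d.getD v 0 + 1)) d)
    PySem.Dict.empty

def advance_width_moves_alt (possible_moves : List (List (List Int))) (x_position : Int) (y_position : Int) : List Int :=
  let row := (PySem.List.pyGet? possible_moves y_position).getD []
  let target := (PySem.List.pyGet? row x_position).getD []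
  let counts := awmCounts row
  -- '{value for value in target if counts.get(value, 0) == 1}'
  target.foldl (fun s v => if counts.getD v 0 == 1 then PySem.Set.add s v else s) PySem.Set.empty

-- ===== PRECONDITION & SPEC =====
-- Pre_ excludes exactly the inputs where Python A raises IndexError: y_position out of range for
-- possible_moves, or x_position out of range for the selected row (B raises there too).
def Pre_advance_width_moves (possible_moves : List (List (List Int))) (x_position : Int) (y_position : Int) : Prop :=
  (PySem.List.pyGet? possible_moves y_position).isSome = true ∧
  (PySem.List.pyGet? ((PySem.List.pyGet? possible_moves y_position).getD []) x_position).isSome = true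
instance (possible_moves : List (List (List Int))) (x_position : Int) (y_position : Int) : Decidable (Pre_advance_width_moves possible_moves x_position y_position) := by unfold Pre_advance_width_moves; infer_instance

def pvWitness_advance_width_moves : List (List (List Int)) × Int × Int := ([[[1, 2, 3], [2, 4]], [[5], [6]]], 0, 0)

-- For negative in-range x_position whose target cell holds a candidate appearing in no other cell
-- of the row, A returns the empty set (enumerate indices are never equal to the negative
-- x_position, so A subtracts the target cell from itself) while B returns those unique candidates,
-- the intended result since a negative index denotes the same cell.
def D_advance_width_moves (possible_moves : List (List (List Int))) (x_position : Int) (y_position : Int) : Prop :=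
  x_position < 0 ∧
  ∃ v ∈ (PySem.List.pyGet? ((PySem.List.pyGet? possible_moves y_position).getD []) x_position).getD [],
    ((PySem.List.pyGet? possible_moves y_position).getD []).countP (fun c => c.contains v) = 1
instance (possible_moves : List (List (List Int))) (x_position : Int) (y_position : Int) : Decidable (D_advance_width_moves possible_moves x_position y_position) := by unfold D_advance_width_moves; infer_instance

def Spec_advance_width_moves (possible_moves : List (List (List Int))) (x_position : Int) (y_position : Int) (out : List Int) : Prop := ¬ D_advance_width_moves possible_moves x_position y_position → out = advance_width_moves_alt possible_moves x_position y_position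
instance (possible_moves : List (List (List Int))) (x_position : Int) (y_position : Int) (out : List Int) : Decidable (Spec_advance_width_moves possible_moves x_position y_position out) := by unfold Spec_advance_width_moves; infer_instance

def pvDiffWitness_advance_width_moves : List (List (List Int)) × Int × Int := ([[[1], [2]]], -2, 0)
def pvDiffWitnessOut_advance_width_moves : (List Int) × (List Int) := ([], [1])

-- ===== CLAIM (what is proved, stated in full; the proofs are below) =====
def Claim_unchanged_advance_width_moves : Prop := ∀ (possible_moves : List (List (List Int))) (x_position : Int) (y_position : Int), Dom_advance_width_moves possible_moves x_position y_position → Pre_advance_width_moves possible_moves x_position y_position → Spec_advance_width_moves possible_moves x_position y_position (advance_width_moves possible_moves x_position y_position)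
def Claim_changed_advance_width_moves : Prop := Dom_advance_width_moves (pvDiffWitness_advance_width_moves.1) (pvDiffWitness_advance_width_moves.2.1) (pvDiffWitness_advance_width_moves.2.2) ∧ Pre_advance_width_moves (pvDiffWitness_advance_width_moves.1) (pvDiffWitness_advance_width_moves.2.1) (pvDiffWitness_advance_width_moves.2.2) ∧ D_advance_width_moves (pvDiffWitness_advance_width_moves.1) (pvDiffWitness_advance_width_moves.2.1) (pvDiffWitness_advance_width_moves.2.2) ∧ advance_width_moves (pvDiffWitness_advance_width_moves.1) (pvDiffWitness_advance_width_moves.2.1) (pvDiffWitness_advance_width_moves.2.2) = pvDiffWitnessOut_advance_width_moves.1 ∧ advance_width_moves_alt (pvDiffWitness_advance_width_moves.1) (pvDiffWitness_advance_width_moves.2.1) (pvDiffWitness_advance_width_moves.2.2) = pvDiffWitnessOut_advance_width_moves.2 ∧ pvDiffWitnessOut_advance_width_moves.1 ≠ pvDiffWitnessOut_advance_width_moves.2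
def Claim_exact_advance_width_moves : Prop := ∀ (possible_moves : List (List (List Int))) (x_position : Int) (y_position : Int), Dom_advance_width_moves possible_moves x_position y_position → Pre_advance_width_moves possible_moves x_position y_position → D_advance_width_moves possible_moves x_position y_position → advance_width_moves possible_moves x_position y_position ≠ advance_width_moves_alt possible_moves x_position y_position

-- ===== LEMMAS AND PROOFS =====

-- A's loop is a filter of its starting set by "not eliminated by any remaining other column".
theorem awmLoopA_eq_filter (x : Int) (l : List (Int × List Int)) (s : PySem.Set Int) :
    awmLoopA x l s = s.filter (fun a => l.all (fun p => p.1 == x || !(p.2.contains a))) := by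
  induction l generalizing s with
  | nil => simp [awmLoopA]
  | cons p rest ih =>
    obtain ⟨ci, col⟩ := p
    by_cases h : ci = x
    · simp [awmLoopA, h, ih]
    · simp only [awmLoopA, h, if_false]
      by_cases hnil : PySem.Set.diff s (PySem.Set.ofList col) = []
      · rw [if_pos hnil, eq_comm, List.filter_eq_nil_iff]
        intro a ha
        have hmem : a ∉ PySem.Set.diff s (PySem.Set.ofList col) := by simp [hnil]
        rw [PySem.Set.mem_diff, PySem.Set.mem_ofList] at hmem
        have : a ∈ col := by by_contra hc; exact hmem ⟨ha, hc⟩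
        simp [h, this]
      · rw [if_neg hnil, ih]
        unfold PySem.Set.diff
        rw [List.filter_filter]
        apply List.filter_congr
        intro a _
        simp [List.all_cons, show (ci == x) = false from beq_eq_false_iff_ne.mpr h,
          PySem.Set.mem_ofList, Bool.and_comm]

-- B's dict holds, for each value, the number of cells of the row containing it.
theorem getD_awmCounts_aux (row : List (List Int)) (v : Int) :
    ∀ d : PySem.Dict Int Int,
      (row.foldl (fun d col => (PySem.Set.ofList col).foldl
          (fun d v => d.insert v (d.getD v 0 + 1)) d) d).getD v 0
        = d.getD v 0 + (row.countP (fun c => c.contains v) : Int) := by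
  induction row with
  | nil => intro d; simp
  | cons col rest ih =>
    intro d
    rw [List.foldl_cons, ih, PySem.Dict.getD_foldl_insert_add_one]
    have hcnt : (PySem.Set.ofList col).count v = if col.contains v then 1 else 0 := by
      by_cases h : v ∈ col
      · rw [List.count_eq_one_of_mem (PySem.Set.nodup_ofList col) ((PySem.Set.mem_ofList _ _).2 h)]
        simp [h]
      · rw [List.count_eq_zero_of_not_mem (fun hc => h ((PySem.Set.mem_ofList _ _).1 hc))]
        simp [h]
    rw [List.countP_cons, hcnt]
    split_ifs <;> simp
    omega

theorem getD_awmCounts (row : List (List Int)) (v : Int) :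
    (awmCounts row).getD v 0 = (row.countP (fun c => c.contains v) : Int) := by
  unfold awmCounts
  rw [getD_awmCounts_aux]
  simp

-- a conditional-add fold from empty is a filter of the deduplicated list
theorem foldl_addIf_aux (p : Int → Bool) (t : List Int) :
    ∀ s : List Int,
      t.foldl (fun s v => if p v then PySem.Set.add s v else s) (s.filter p)
        = (t.foldl PySem.Set.add s).filter p := by
  induction t with
  | nil => intro s; simp
  | cons v rest ih =>
    intro s
    rw [List.foldl_cons, List.foldl_cons]
    by_cases hp : p v
    · rw [if_pos hp]
      have hadd : PySem.Set.add (s.filter p) v = (PySem.Set.add s v).filter p := by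
        unfold PySem.Set.add
        by_cases hm : v ∈ s
        · simp [PySem.Set.contains_eq_listContains, hm, hp]
        · simp [PySem.Set.contains_eq_listContains, hm, hp, List.filter_append]
      rw [hadd, ih]
    · rw [if_neg hp]
      have hadd : s.filter p = (PySem.Set.add s v).filter p := by
        unfold PySem.Set.add
        by_cases hm : v ∈ s
        · simp [PySem.Set.contains_eq_listContains, hm]
        · simp [PySem.Set.contains_eq_listContains, hm, List.filter_append, hp]
      rw [hadd, ih]

theorem foldl_addIf_eq_filter (p : Int → Bool) (t : List Int) :
    t.foldl (fun s v => if p v then PySem.Set.add s v else s) PySem.Set.empty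
      = (PySem.Set.ofList t).filter p := by
  have h := foldl_addIf_aux p t []
  simpa [PySem.Set.ofList_eq_foldl] using h

-- count-one characterisation of "no other index's cell contains v", given v ∈ l[j]
theorem countP_one_iff (v : Int) (l : List (List Int)) (j : Nat) (hj : j < l.length)
    (hv : v ∈ l[j]) :
    l.countP (fun c => c.contains v) = 1 ↔
      ∀ k, (hk : k < l.length) → k ≠ j → v ∉ l[k] := by
  induction l generalizing j with
  | nil => simp at hj
  | cons c rest ih =>
    cases j with
    | zero =>
      simp only [List.getElem_cons_zero] at hv
      rw [List.countP_cons]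
      have hpc : c.contains v = true := by
        simp [List.contains_eq_mem, hv]
      rw [if_pos hpc]
      constructor
      · intro h k hk hk0
        have hz : rest.countP (fun c => c.contains v) = 0 := by omega
        rw [List.countP_eq_zero] at hz
        cases k with
        | zero => exact absurd rfl hk0
        | succ k' =>
          have hk' : k' < rest.length := by simpa using hk
          intro hm
          have := hz rest[k'] (rest.getElem_mem hk')
          simp only [List.contains_eq_mem, decide_eq_true_eq] at this
          exact this (by simpa using hm)
      · intro h
        have hz : rest.countP (fun c => c.contains v) = 0 := by
          rw [List.countP_eq_zero]
          intro a ha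
          obtain ⟨k', hk', rfl⟩ := List.mem_iff_getElem.1 ha
          have := h (k' + 1) (by simpa using Nat.succ_lt_succ hk') (Nat.succ_ne_zero _)
          simpa [List.contains_eq_mem] using this
        omega
    | succ j' =>
      have hj' : j' < rest.length := by simpa using hj
      simp only [List.getElem_cons_succ] at hv
      rw [List.countP_cons]
      constructor
      · intro h k hk hkj
        have hpos : 0 < rest.countP (fun c => c.contains v) :=
          List.countP_pos_iff.mpr ⟨rest[j'], rest.getElem_mem hj', by
            simp [List.contains_eq_mem, hv]⟩
        have hif : (if c.contains v = true then 1 else 0) = 0 := by omega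
        have hcv : v ∉ c := by
          intro hcc
          simp [List.contains_eq_mem, hcc] at hif
        have hr : rest.countP (fun c => c.contains v) = 1 := by omega
        cases k with
        | zero => simpa using hcv
        | succ k' =>
          have hk' : k' < rest.length := by simpa using hk
          have := (ih j' hj' hv).1 hr k' hk' (by omega)
          simpa using this
      · intro h
        have hcv : v ∉ c := by
          have := h 0 (by simp) (Nat.succ_ne_zero j').symm
          simpa using this
        have hr : rest.countP (fun c => c.contains v) = 1 := by
          rw [ih j' hj' hv]
          intro k hk hkj
          have := h (k + 1) (by simpa using Nat.succ_lt_succ hk) (by omega)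
          simpa using this
        have hpc : c.contains v = false := by
          simp [List.contains_eq_mem, hcv]
        rw [hpc]
        simpa using hr

-- A's per-element predicate, nonnegative index case
theorem predA_eq_countP (v : Int) (row : List (List Int)) (j : Nat) (hj : j < row.length)
    (hv : v ∈ row[j]) :
    ((PySem.List.enumerate row).all (fun p => p.1 == (j : Int) || !(p.2.contains v)))
      = (row.countP (fun c => c.contains v) == 1) := by
  rw [Bool.eq_iff_iff]
  simp only [List.all_eq_true, Bool.or_eq_true, beq_iff_eq, Bool.not_eq_true']
  rw [countP_one_iff v row j hj hv]
  constructor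
  · intro h k hk hkj
    have hmem : ((0 : Int) + (k : Nat), row[k]) ∈ PySem.List.enumerate row := by
      rw [PySem.List.mem_enumerate_iff]
      exact ⟨k, hk, rfl⟩
    rcases h _ hmem with h1 | h1
    · exfalso; apply hkj
      have : (k : Int) = (j : Int) := by simpa using h1
      exact_mod_cast this
    · simp only [List.contains_eq_mem, decide_eq_false_iff_not] at h1
      exact h1
  · intro h p hp
    rw [PySem.List.mem_enumerate_iff] at hp
    obtain ⟨k, hk, rfl⟩ := hp
    by_cases hkj : k = j
    · left; simp [hkj]
    · right
      have := h k hk hkj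
      simp [List.contains_eq_mem, this]

-- A's per-element predicate is false for target candidates when x is negative
theorem predA_false_of_neg (v : Int) (row : List (List Int)) (x : Int) (hx : x < 0)
    (target : List Int)
    (ht : PySem.List.pyGet? row x = some target) (hvt : v ∈ target) :
    ((PySem.List.enumerate row).all (fun p => p.1 == x || !(p.2.contains v))) = false := by
  have htm : target ∈ row := PySem.List.mem_of_pyGet?_eq_some row ht
  obtain ⟨k, hk, hke⟩ := List.mem_iff_getElem.1 htm
  rw [List.all_eq_false]
  refine ⟨((0 : Int) + (k : Nat), row[k]), ?_, ?_⟩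
  · rw [PySem.List.mem_enumerate_iff]; exact ⟨k, hk, rfl⟩
  · simp only [Bool.not_eq_true, Bool.or_eq_false_iff, beq_eq_false_iff_ne, ne_eq]
    constructor
    · intro hc; omega
    · rw [hke]; simpa [List.contains_eq_mem] using hvt

-- B as a filter of the target's distinct candidates by "count is one"
theorem altB_eq_filter (possible_moves : List (List (List Int))) (x y : Int) :
    advance_width_moves_alt possible_moves x y
      = (PySem.Set.ofList ((PySem.List.pyGet? ((PySem.List.pyGet? possible_moves y).getD []) x).getD [])).filter
          (fun v => ((PySem.List.pyGet? possible_moves y).getD []).countP (fun c => c.contains v) == 1) := by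
  unfold advance_width_moves_alt
  rw [foldl_addIf_eq_filter]
  apply List.filter_congr
  intro v _
  rw [getD_awmCounts]
  rw [Bool.eq_iff_iff]
  constructor
  · intro h; have := (beq_iff_eq).1 h; exact (beq_iff_eq).2 (by exact_mod_cast this)
  · intro h; have := (beq_iff_eq).1 h; exact (beq_iff_eq).2 (by exact_mod_cast this)

-- ===== VERDICT (by name: the statement is the Claim_ definition above) =====
theorem advance_width_moves_spec : Claim_unchanged_advance_width_moves := by
  intro pm x y _ hpre hnD
  obtain ⟨hy, hx⟩ := hpre
  obtain ⟨target, ht⟩ := Option.isSome_iff_exists.1 hx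
  have htD : (PySem.List.pyGet? ((PySem.List.pyGet? pm y).getD []) x).getD [] = target := by
    rw [ht]; rfl
  rw [altB_eq_filter]
  unfold advance_width_moves
  rw [awmLoopA_eq_filter]
  apply List.filter_congr
  intro v hvset
  rw [htD] at hvset
  have hvt : v ∈ target := (PySem.Set.mem_ofList _ _).1 hvset
  by_cases hxs : 0 ≤ x
  · -- nonnegative index: the skipped cell is exactly row[x]
    have hrange : ¬ (PySem.List.pyGet? ((PySem.List.pyGet? pm y).getD []) x = none) := by
      simp [ht]
    rw [PySem.List.pyGet?_eq_none_iff, PySem.Raise.InRange] at hrange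
    have hlt : x < (((PySem.List.pyGet? pm y).getD []).length : Int) := by omega
    have hj : x.toNat < ((PySem.List.pyGet? pm y).getD []).length := by omega
    have hget : PySem.List.pyGet? ((PySem.List.pyGet? pm y).getD []) x
        = some ((PySem.List.pyGet? pm y).getD [])[x.toNat] :=
      PySem.List.pyGet?_eq_some_getElem _ hxs (by omega)
    have hte : ((PySem.List.pyGet? pm y).getD [])[x.toNat] = target := by
      rw [hget] at ht; exact Option.some.inj ht
    have hvj : v ∈ ((PySem.List.pyGet? pm y).getD [])[x.toNat] := hte ▸ hvt
    have hcast : ((x.toNat : Nat) : Int) = x := by omega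
    rw [← hcast]
    exact predA_eq_countP v _ x.toNat hj hvj
  · -- negative index: A's predicate is false; ¬D makes B's false too
    have hxneg : x < 0 := by omega
    have hA := predA_false_of_neg v ((PySem.List.pyGet? pm y).getD []) x hxneg target ht hvt
    have hB : (((PySem.List.pyGet? pm y).getD []).countP (fun c => c.contains v) == 1)
        = false := by
      rw [beq_eq_false_iff_ne]
      intro hc
      exact hnD ⟨hxneg, v, by rw [htD]; exact hvt, hc⟩
    rw [hA, hB]

theorem advance_width_moves_changed : Claim_changed_advance_width_moves := by
  unfold Claim_changed_advance_width_moves; decide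

theorem advance_width_moves_tight : Claim_exact_advance_width_moves := by
  intro pm x y _ hpre hD
  obtain ⟨hy, hx⟩ := hpre
  obtain ⟨hxneg, v, hvt, hcnt⟩ := hD
  obtain ⟨target, ht⟩ := Option.isSome_iff_exists.1 hx
  have htD : (PySem.List.pyGet? ((PySem.List.pyGet? pm y).getD []) x).getD [] = target := by
    rw [ht]; rfl
  rw [htD] at hvt
  -- A is empty
  have hAnil : advance_width_moves pm x y = [] := by
    unfold advance_width_moves
    rw [awmLoopA_eq_filter, List.filter_eq_nil_iff]
    intro a ha
    rw [htD] at ha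
    have hat : a ∈ target := (PySem.Set.mem_ofList _ _).1 ha
    rw [predA_false_of_neg a ((PySem.List.pyGet? pm y).getD []) x hxneg target ht hat]
    simp
  -- B contains v
  have hBmem : v ∈ advance_width_moves_alt pm x y := by
    rw [altB_eq_filter, List.mem_filter]
    refine ⟨?_, ?_⟩
    · rw [htD]; exact (PySem.Set.mem_ofList _ _).2 hvt
    · exact (beq_iff_eq).2 hcnt
  intro hEq
  rw [hAnil] at hEq
  rw [← hEq] at hBmem
  exact List.not_mem_nil hBmem
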